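-- pv_equiv track=rewrite | github.com/flipz357/amr-quality-rater | pytorch-src/my_tokenizers.py | pad_crop
-- ===== SOURCE A (Python) =====
-- def pad_crop(tmp, out_dim=(30,13)):
--
--     """Funtion that pads and crops a 2d amr to the wished size.
--
--     Args:
--         tmp (list with list of ints): e.g. [[4],[5,6,7]]
--         out_dim: desired out dimension
--
--     Returns:
--         list with list of strings: e.g. if out_dim=(3,2), [[4,1],[5,6],[1,1]]
--     """
--
--     new_outer = []
--     for j,ls in enumerate(tmp):
--         new_inner = []
--         for i,num in enumerate(ls):
--             if i < out_dim[1]: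
--                 new_inner.append(num)
--         while len(new_inner) < out_dim[1]:
--             new_inner = new_inner + [1]
--         if j < out_dim[0]:
--             new_outer.append(new_inner)
--     while len(new_outer) < out_dim[0]:
--         #new_outer = [[1]*out_dim[1]]+new_outer
--         new_outer = new_outer + [[1] * out_dim[1]]
--     return new_outer
-- ===== SOURCE B (Python) =====
-- def pad_crop(tmp, out_dim=(30,13)):
--     # Pre-allocate the full output grid of pad value 1, then overwrite the
--     # cells that exist in tmp; no crop/pad rebuilding, no while loops.
--     out = [[1] * out_dim[1] for _ in range(out_dim[0])]
--     for j in range(min(len(tmp), out_dim[0])):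
--         row = out[j]
--         src = tmp[j]
--         for i in range(min(len(src), out_dim[1])):
--             row[i] = src[i]
--     return out
-- ===== Notes on version B (the rewrite author's own statement) =====
-- stated objective: faster
-- what changed: B pre-allocates the full out_dim[0] x out_dim[1] grid of pad value 1 and overwrites the existing cells of tmp in place, instead of A's per-row rebuild with append loops and grow-by-concatenation (xs = xs + [1]) while loops.
import Mathlib
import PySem

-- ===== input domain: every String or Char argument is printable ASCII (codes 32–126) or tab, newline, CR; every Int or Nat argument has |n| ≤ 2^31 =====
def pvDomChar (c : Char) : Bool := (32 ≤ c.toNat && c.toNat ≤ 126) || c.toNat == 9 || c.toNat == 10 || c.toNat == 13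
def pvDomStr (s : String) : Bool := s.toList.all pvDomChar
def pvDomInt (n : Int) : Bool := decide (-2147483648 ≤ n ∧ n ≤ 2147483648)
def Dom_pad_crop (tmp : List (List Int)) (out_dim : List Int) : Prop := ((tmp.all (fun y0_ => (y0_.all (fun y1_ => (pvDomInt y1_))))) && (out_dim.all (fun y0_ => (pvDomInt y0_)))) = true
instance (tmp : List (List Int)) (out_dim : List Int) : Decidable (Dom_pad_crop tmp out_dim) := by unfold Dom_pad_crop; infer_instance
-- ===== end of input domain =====

-- B pads/crops by pre-allocating the whole output grid and overwriting existing cells,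
-- instead of A's per-row rebuild loops and grow-by-one while loops (objective: simpler).

-- ===== PORT A =====
-- 'while len(xs) < k: xs = xs + [pad]'  (used for both while loops of A)
def padWhile {β : Type} (pad : β) (xs : List β) (k : Int) : List β :=
  if (xs.length : Int) < k then padWhile pad (xs ++ [pad]) k else xs
termination_by (k - xs.length).toNat
decreasing_by simp; omega

def pad_crop (tmp : List (List Int)) (out_dim : List Int) : List (List Int) :=
  let new_outer := (PySem.List.enumerate tmp 0).foldl (fun acc p =>
    let new_inner := (PySem.List.enumerate p.2 0).foldl (fun acc2 q =>
      if q.1 < PySem.List.pyGetD out_dim 1 0 then acc2 ++ [q.2] else acc2) []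
    let new_inner := padWhile 1 new_inner (PySem.List.pyGetD out_dim 1 0)
    if p.1 < PySem.List.pyGetD out_dim 0 0 then acc ++ [new_inner] else acc) []
  padWhile (PySem.List.pyRepeat [1] (PySem.List.pyGetD out_dim 1 0)) new_outer
    (PySem.List.pyGetD out_dim 0 0)

-- ===== PORT B =====
-- preallocated grid of 1s, cell (j,i) overwritten by tmp[j][i] where it exists
def pad_crop_alt (tmp : List (List Int)) (out_dim : List Int) : List (List Int) :=
  let d0 := PySem.List.pyGetD out_dim 0 0
  let d1 := PySem.List.pyGetD out_dim 1 0
  (List.range d0.toNat).map (fun j =>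
    (List.range d1.toNat).map (fun i =>
      if j < tmp.length ∧ i < (tmp.getD j []).length then (tmp.getD j []).getD i 1 else 1))

-- ===== PRECONDITION & SPEC =====
-- A indexes out_dim[0] and out_dim[1] (IndexError on a too-short out_dim), except that with
-- an empty tmp and out_dim[0] <= 0 neither index is ever evaluated; Pre_ admits exactly the
-- inputs where A returns normally.
def Pre_pad_crop (tmp : List (List Int)) (out_dim : List Int) : Prop :=
  2 ≤ out_dim.length ∨ (out_dim.length = 1 ∧ tmp = [] ∧ out_dim.getD 0 0 ≤ 0)
instance (tmp : List (List Int)) (out_dim : List Int) : Decidable (Pre_pad_crop tmp out_dim) := by unfold Pre_pad_crop; infer_instance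
def pvWitness_pad_crop : List (List Int) × List Int := ([[4], [5, 6, 7]], [3, 2])

def Spec_pad_crop (tmp : List (List Int)) (out_dim : List Int) (out : List (List Int)) : Prop := out = pad_crop_alt tmp out_dim
instance (tmp : List (List Int)) (out_dim : List Int) (out : List (List Int)) : Decidable (Spec_pad_crop tmp out_dim out) := by unfold Spec_pad_crop; infer_instance

-- ===== CLAIM (what is proved, stated in full; the proofs are below) =====
def Claim_equal_pad_crop : Prop := ∀ (tmp : List (List Int)) (out_dim : List Int), Dom_pad_crop tmp out_dim → Pre_pad_crop tmp out_dim → Spec_pad_crop tmp out_dim (pad_crop tmp out_dim)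

-- ===== LEMMAS AND PROOFS =====

-- A's index-guarded append loop keeps exactly the first (d - s) elements.
lemma foldIdx {α β : Type} (proc : α → β) (d : Int) :
    ∀ (xs : List α) (s : Int) (acc : List β),
    ((PySem.List.enumerate xs s).foldl
        (fun acc2 q => if q.1 < d then acc2 ++ [proc q.2] else acc2) acc)
      = acc ++ (xs.take (d - s).toNat).map proc := by
  intro xs
  induction xs with
  | nil => intro s acc; simp [PySem.List.enumerate_nil]
  | cons x xs ih =>
    intro s acc
    rw [PySem.List.enumerate_cons, List.foldl_cons]
    by_cases h : s < d
    · have ht : (d - s).toNat = (d - (s + 1)).toNat + 1 := by omega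
      simp only [h, if_pos, ht, List.take_succ_cons, List.map_cons]
      rw [ih (s + 1) (acc ++ [proc x])]
      simp
    · have h0 : (d - s).toNat = 0 := by omega
      have h1 : (d - (s + 1)).toNat = 0 := by omega
      simp only [h, if_neg, not_false_iff, h0, List.take_zero, List.map_nil, List.append_nil]
      rw [ih (s + 1) acc, h1]
      simp

-- A's while loop appends exactly (k - len).toNat copies of pad.
lemma padWhile_eq {β : Type} (pad : β) :
    ∀ (n : Nat) (xs : List β) (k : Int), (k - xs.length).toNat = n →
    padWhile pad xs k = xs ++ List.replicate n pad := by
  intro n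
  induction n with
  | zero =>
    intro xs k h
    rw [padWhile]
    have : ¬ ((xs.length : Int) < k) := by omega
    simp [this]
  | succ m ih =>
    intro xs k h
    rw [padWhile]
    have hlt : (xs.length : Int) < k := by omega
    rw [if_pos hlt, ih (xs ++ [pad]) k (by simp; omega)]
    simp [List.replicate_succ]

-- crop-then-pad of a prefix equals the preallocate-and-overwrite row of B.
lemma take_map_pad {α β : Type} (g : α → β) (pad : β) (dflt : α) :
    ∀ (t : Nat) (xs : List α),
    (xs.take t).map g ++ List.replicate (t - min t xs.length) pad
      = (List.range t).map (fun j => if j < xs.length then g (xs.getD j dflt) else pad) := by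
  intro t
  induction t with
  | zero => intro xs; simp
  | succ m ih =>
    intro xs
    cases xs with
    | nil =>
      simp [List.map_const']
    | cons x xs =>
      rw [List.range_succ_eq_map, List.map_cons, List.map_map]
      have : (List.range m).map ((fun j => if j < (x :: xs).length then g ((x :: xs).getD j dflt) else pad) ∘ Nat.succ)
           = (List.range m).map (fun j => if j < xs.length then g (xs.getD j dflt) else pad) := by
        apply List.map_congr_left
        intro j _
        simp
      rw [this, ← ih xs]
      simp only [List.take_succ_cons, List.map_cons, List.length_cons]
      have : m + 1 - min (m + 1) (xs.length + 1) = m - min m xs.length := by omega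
      rw [this]
      simp

theorem pad_crop_spec : Claim_equal_pad_crop := by
  intro tmp out_dim _ _
  unfold Spec_pad_crop pad_crop pad_crop_alt
  set d0 := PySem.List.pyGetD out_dim 0 0 with hd0
  set d1 := PySem.List.pyGetD out_dim 1 0 with hd1
  simp only []
  -- inner row: crop fold + pad
  have hrow : ∀ ls : List Int,
      padWhile 1 ((PySem.List.enumerate ls 0).foldl
        (fun acc2 q => if q.1 < d1 then acc2 ++ [q.2] else acc2) []) d1
      = (List.range d1.toNat).map (fun i => if i < ls.length then ls.getD i 1 else 1) := by
    intro ls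
    have hf := foldIdx (fun x => x) d1 ls 0 []
    simp only [List.map_id'] at hf
    rw [hf]
    simp only [List.nil_append]
    rw [padWhile_eq 1 ((d1 - (ls.take (d1 - 0).toNat).length).toNat) _ d1 rfl]
    have hlen : (ls.take (d1 - 0).toNat).length = min (d1 - 0).toNat ls.length := by simp
    have h1 : (d1 - ((ls.take (d1 - 0).toNat).length : Int)).toNat
            = d1.toNat - min d1.toNat ls.length := by rw [hlen]; omega
    have h2 : (d1 - 0).toNat = d1.toNat := by omega
    rw [h1, h2]
    simpa using take_map_pad (fun x : Int => x) 1 1 d1.toNat ls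
  -- outer: fold keeps processed prefix rows, then pad with ones rows
  have hout := foldIdx
    (fun ls => padWhile 1 ((PySem.List.enumerate ls 0).foldl
        (fun acc2 q => if q.1 < d1 then acc2 ++ [q.2] else acc2) []) d1)
    d0 tmp 0 []
  rw [hout]
  simp only [List.nil_append]
  rw [padWhile_eq (PySem.List.pyRepeat [1] d1)
      ((d0 - ((tmp.take (d0 - 0).toNat).map _).length).toNat) _ d0 rfl]
  have hlen : (((tmp.take (d0 - 0).toNat).map
      (fun ls => padWhile 1 ((PySem.List.enumerate ls 0).foldl
        (fun acc2 q => if q.1 < d1 then acc2 ++ [q.2] else acc2) []) d1)).length : Int)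
      = ((min (d0 - 0).toNat tmp.length : Nat) : Int) := by simp
  rw [hlen]
  have h1 : ((d0 - ((min (d0 - 0).toNat tmp.length : Nat) : Int)).toNat)
          = d0.toNat - min d0.toNat tmp.length := by omega
  have h2 : (d0 - 0).toNat = d0.toNat := by omega
  have hrep : PySem.List.pyRepeat ([1] : List Int) d1
      = List.replicate d1.toNat 1 := PySem.List.pyRepeat_singleton 1 d1
  rw [h1, h2, hrep]
  rw [take_map_pad _ (List.replicate d1.toNat 1) ([] : List Int) d0.toNat tmp]
  apply List.map_congr_left
  intro j _
  by_cases hj : j < tmp.length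
  · rw [if_pos hj, hrow (tmp.getD j [])]
    apply List.map_congr_left
    intro i _
    simp [hj]
  · rw [if_neg hj]
    have : ∀ i ∈ List.range d1.toNat,
        (if j < tmp.length ∧ i < (tmp.getD j []).length then (tmp.getD j []).getD i 1 else (1:Int)) = 1 := by
      intro i _; simp [hj]
    rw [List.map_congr_left this]
    simp [List.map_const']
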